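-- pv_equiv track=rewrite | github.com/ChChelis/CLT-Jnator3000 | clt_jnator_qt.py | normalize_task_name_parts
-- ===== SOURCE A (Python) =====
-- import unicodedata
--
-- def normalize_task_name_parts(value):
--     without_accents = unicodedata.normalize("NFKD", str(value))
--     ascii_text = without_accents.encode("ascii", "ignore").decode("ascii")
--     parts = []
--     current = []
--     for character in ascii_text.lower():
--         if character.isalpha():
--             current.append(character)
--         elif current:
--             parts.append("".join(current))
--             current = []
--     if current:
--         parts.append("".join(current))
--     return parts
-- ===== SOURCE B (Python) =====
-- import unicodedata
--
-- def normalize_task_name_parts(value):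
--     without_accents = unicodedata.normalize("NFKD", str(value))
--     ascii_text = without_accents.encode("ascii", "ignore").decode("ascii").lower()
--     # blank out every non-alphabetic character, then let str.split() collect the runs
--     return "".join(c if c.isalpha() else " " for c in ascii_text).split()
-- ===== Notes on version B (the rewrite author's own statement) =====
-- stated objective: idiomatic
-- what changed: Replaced the per-character state machine (current buffer, flush on non-alpha, trailing flush) with blanking every non-alphabetic character to a space and letting str.split() collect the maximal alphabetic runs.
import Mathlib
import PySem

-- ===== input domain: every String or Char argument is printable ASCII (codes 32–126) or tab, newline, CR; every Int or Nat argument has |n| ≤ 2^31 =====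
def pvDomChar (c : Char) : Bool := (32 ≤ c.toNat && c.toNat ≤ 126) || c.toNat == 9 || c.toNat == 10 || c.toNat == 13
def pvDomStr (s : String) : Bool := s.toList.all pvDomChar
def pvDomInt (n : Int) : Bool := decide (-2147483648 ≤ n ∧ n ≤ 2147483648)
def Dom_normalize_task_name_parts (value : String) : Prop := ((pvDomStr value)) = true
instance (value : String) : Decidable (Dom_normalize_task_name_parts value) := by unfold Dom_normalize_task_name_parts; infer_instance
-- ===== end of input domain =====

-- B replaces A's per-character state machine (current buffer, flush on non-alpha, trailing flush)
-- by blanking every non-alphabetic character and letting str.split() collect the maximal runs (objective: idiomatic).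

-- ===== PORT A =====
-- A's loop: `parts`/`current` exactly as in the Python; branches in the Python's order.
def normTNPGo : List Char → List String → List Char → List String
  | [], parts, current =>
      -- trailing `if current: parts.append("".join(current))`
      if current.isEmpty then parts else parts ++ [String.ofList current]
  | c :: rest, parts, current =>
      if PySem.Chars.isalpha c then normTNPGo rest parts (current ++ [c])
      else if !current.isEmpty then normTNPGo rest (parts ++ [String.ofList current]) []
      else normTNPGo rest parts current

def normalize_task_name_parts (value : String) : List String :=
  -- str(value) is value; on the ASCII domain Dom_, NFKD normalization and
  -- .encode("ascii","ignore").decode("ascii") are the identity — exact on Dom_.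
  normTNPGo (PySem.Chars.lower value.toList) [] []

-- ===== PORT B =====
-- `c if c.isalpha() else " "` from Source B's join-comprehension
def pvBlank (c : Char) : Char := if PySem.Chars.isalpha c then c else ' '

def normalize_task_name_parts_alt (value : String) : List String :=
  -- same identity NFKD/ascii prefix as A (exact on Dom_), then .lower()
  let asciiText : List Char := PySem.Chars.lower value.toList
  -- "".join(c if c.isalpha() else " " for c in ascii_text).split()
  (PySem.Chars.split₀ (asciiText.map pvBlank)).map String.ofList

-- ===== PRECONDITION & SPEC =====
def Spec_normalize_task_name_parts (value : String) (out : List String) : Prop := out = normalize_task_name_parts_alt value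
instance (value : String) (out : List String) : Decidable (Spec_normalize_task_name_parts value out) := by unfold Spec_normalize_task_name_parts; infer_instance

-- ===== CLAIM (what is proved, stated in full; the proofs are below) =====
def Claim_equal_normalize_task_name_parts : Prop := ∀ (value : String), Dom_normalize_task_name_parts value → Spec_normalize_task_name_parts value (normalize_task_name_parts value)

-- ===== LEMMAS AND PROOFS =====

-- An alphabetic character is never a whitespace character.
lemma alpha_not_space (c : Char) (h : PySem.Chars.isalpha c = true) :
    PySem.Chars.isspace c = false := by
  have hA : 'A'.val.toNat = 65 := rfl
  have hZ : 'Z'.val.toNat = 90 := rfl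
  have ha : 'a'.val.toNat = 97 := rfl
  have hz : 'z'.val.toNat = 122 := rfl
  simp only [PySem.Chars.isalpha, PySem.Chars.isupper, PySem.Chars.islower, Bool.or_eq_true,
    Bool.and_eq_true, decide_eq_true_eq, Char.le_def, UInt32.le_iff_toNat_le, hA, hZ, ha, hz] at h
  simp only [PySem.Chars.isspace, Bool.or_eq_false_iff, Bool.and_eq_false_iff,
    decide_eq_false_iff_not, Char.toNat]
  omega

-- Loop invariant: A's state machine on cs with an all-alphabetic in-progress buffer `cur`
-- equals split₀'s scanner on the blanked characters (which keeps its buffer reversed).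
lemma go_eq (cs : List Char) : ∀ (cur : List Char) (acc : List (List Char)),
    (∀ c ∈ cur, PySem.Chars.isalpha c = true) →
    normTNPGo cs ((acc.reverse).map String.ofList) cur
      = (PySem.Chars.split₀.go (cs.map pvBlank) cur.reverse acc).map String.ofList := by
  induction cs with
  | nil =>
    intro cur acc _
    simp only [normTNPGo, List.map_nil, PySem.Chars.split₀.go, List.isEmpty_reverse,
      List.reverse_reverse]
    by_cases h : cur.isEmpty <;> simp [h]
  | cons c rest ih =>
    intro cur acc hcur
    simp only [List.map_cons, normTNPGo]
    by_cases hc : PySem.Chars.isalpha c = true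
    · have : pvBlank c = c := by simp [pvBlank, hc]
      rw [this]
      simp only [PySem.Chars.split₀.go, alpha_not_space c hc, Bool.false_eq_true,
        if_pos hc]
      have := ih (cur ++ [c]) acc (by intro x hx; rcases List.mem_append.1 hx with h|h
                                      · exact hcur x h
                                      · simp at h; subst h; exact hc)
      simpa using this
    · have hb : pvBlank c = ' ' := by simp [pvBlank, hc]
      rw [hb]
      have hsp : PySem.Chars.isspace ' ' = true := by decide
      simp only [PySem.Chars.split₀.go, hsp, if_pos, if_neg hc, List.isEmpty_reverse,
        List.reverse_reverse]
      by_cases hcur0 : cur.isEmpty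
      · simp only [hcur0, Bool.not_true, Bool.false_eq_true]
        have hnil : cur = [] := List.isEmpty_iff.1 hcur0
        subst hnil
        exact ih [] acc (by simp)
      · simp only [hcur0, Bool.not_false, if_pos, Bool.false_eq_true]
        have := ih [] (cur :: acc) (by simp)
        simpa using this

-- ===== VERDICT (by name: the statement is the Claim_ definition above) =====
theorem normalize_task_name_parts_spec : Claim_equal_normalize_task_name_parts := by
  intro value _
  show normalize_task_name_parts value = normalize_task_name_parts_alt value
  have := go_eq (PySem.Chars.lower value.toList) [] [] (by simp)
  simpa [normalize_task_name_parts, normalize_task_name_parts_alt, PySem.Chars.split₀] using this
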